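-- pv_equiv track=rewrite | github.com/sskeysskey/Financial_System | Query/Custom_Filter.py | match_symbols
-- ===== SOURCE A (Python) =====
-- def match_symbols(symbols, symbol_tags, keywords, blacklist):
--     """
--     返回一个 dict：{ symbol: [其所有 tags 列表] }，满足：
--       1. 至少有一个标签部分匹配 白名单关键词
--       2. 且无任何标签部分匹配 黑名单关键词
--     """
--     kw_lower = [kw.lower() for kw in keywords]
--     bl_lower = [bl.lower() for bl in blacklist]
--
--     matched = {}
--     for sym in symbols:
--         tags = symbol_tags.get(sym, [])
--         # 跳过所有黑名单标签
--         if any(any(bl in tag.lower() for bl in bl_lower) for tag in tags):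
--             continue
--
--         # 若有标签匹配白名单，则保留
--         if any(any(kw in tag.lower() for kw in kw_lower) for tag in tags):
--             matched[sym] = tags
--
--     return matched
-- ===== SOURCE B (Python) =====
-- def match_symbols(symbols, symbol_tags, keywords, blacklist):
--     kws = [k.lower() for k in keywords]
--     bls = [b.lower() for b in blacklist]
--     # pass 1: prefilter the tag table itself into the eligible symbols
--     eligible = {}
--     for sym, tags in symbol_tags.items():
--         low = [t.lower() for t in tags]
--         if not any(b in t for t in low for b in bls) and any(k in t for t in low for k in kws):
--             eligible[sym] = tags
--     # pass 2: the requested symbols are resolved by pure dict lookups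
--     out = {}
--     for sym in symbols:
--         if sym in eligible:
--             out[sym] = eligible[sym]
--     return out
-- ===== Notes on version B (the rewrite author's own statement) =====
-- stated objective: alternative
-- what changed: B inverts the traversal: one pass over symbol_tags.items() prefilters the tag table into a dict of eligible symbols (each tag list scanned once, lowercased once), and the result is then assembled by pure dict lookups over symbols; A instead fetches and re-scans the tag lists once per element of symbols.
import Mathlib
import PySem

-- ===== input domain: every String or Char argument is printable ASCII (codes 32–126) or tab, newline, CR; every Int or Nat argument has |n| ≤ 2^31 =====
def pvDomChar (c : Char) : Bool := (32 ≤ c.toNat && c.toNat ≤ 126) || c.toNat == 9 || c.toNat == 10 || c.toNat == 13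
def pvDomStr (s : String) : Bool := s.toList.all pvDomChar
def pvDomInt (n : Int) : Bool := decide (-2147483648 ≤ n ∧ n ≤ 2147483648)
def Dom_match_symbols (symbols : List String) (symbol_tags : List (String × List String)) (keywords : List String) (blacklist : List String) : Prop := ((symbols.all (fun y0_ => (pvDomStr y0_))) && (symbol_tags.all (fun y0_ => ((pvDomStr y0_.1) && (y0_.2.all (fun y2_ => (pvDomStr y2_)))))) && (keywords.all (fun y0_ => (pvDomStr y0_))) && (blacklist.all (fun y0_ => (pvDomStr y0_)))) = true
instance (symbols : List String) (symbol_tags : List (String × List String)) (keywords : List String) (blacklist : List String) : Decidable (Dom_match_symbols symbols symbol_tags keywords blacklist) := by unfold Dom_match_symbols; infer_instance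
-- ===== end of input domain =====

-- B inverts the traversal: one pass over symbol_tags prefilters the tag table into an eligible dict, then symbols are resolved by pure lookups; same return value as A (objective: alternative).
-- ===== PORT A =====
def match_symbols (symbols : List String) (symbol_tags : List (String × List String)) (keywords : List String) (blacklist : List String) : List (String × List String) :=
  let kw_lower := keywords.map PySem.Str.lower
  let bl_lower := blacklist.map PySem.Str.lower
  (symbols.foldl (fun (matched : PySem.Dict String (List String)) sym =>
    let tags := (PySem.Dict.mk symbol_tags).getD sym []
    if tags.any (fun tag => bl_lower.any (fun bl => PySem.Str.isIn bl (PySem.Str.lower tag))) then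
      matched
    else if tags.any (fun tag => kw_lower.any (fun kw => PySem.Str.isIn kw (PySem.Str.lower tag))) then
      matched.insert sym tags
    else
      matched) PySem.Dict.empty).items

-- ===== PORT B =====
-- the items view of symbol_tags seen as a Python dict: first occurrence of each key, first-match value
def pvDictItems (l : List (String × List String)) : List (String × List String) :=
  (PySem.List.dedup (l.map Prod.fst)).map (fun k => (k, (PySem.Dict.mk l).getD k []))

def match_symbols_alt (symbols : List String) (symbol_tags : List (String × List String)) (keywords : List String) (blacklist : List String) : List (String × List String) :=
  let kws := keywords.map PySem.Str.lower
  let bls := blacklist.map PySem.Str.lower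
  -- pass 1: prefilter the tag table itself
  let eligible := (pvDictItems symbol_tags).foldl
    (fun (d : PySem.Dict String (List String)) p =>
      if !((p.2.map PySem.Str.lower).any (fun t => bls.any (fun b => PySem.Str.isIn b t)))
          && (p.2.map PySem.Str.lower).any (fun t => kws.any (fun k => PySem.Str.isIn k t)) then
        d.insert p.1 p.2
      else d) PySem.Dict.empty
  -- pass 2: pure lookups
  (symbols.foldl (fun (out : PySem.Dict String (List String)) sym =>
    match eligible.get? sym with
    | some tags => out.insert sym tags
    | none => out) PySem.Dict.empty).items

-- ===== PRECONDITION & SPEC =====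
def Spec_match_symbols (symbols : List String) (symbol_tags : List (String × List String)) (keywords : List String) (blacklist : List String) (out : List (String × List String)) : Prop := out = match_symbols_alt symbols symbol_tags keywords blacklist
instance (symbols : List String) (symbol_tags : List (String × List String)) (keywords : List String) (blacklist : List String) (out : List (String × List String)) : Decidable (Spec_match_symbols symbols symbol_tags keywords blacklist out) := by unfold Spec_match_symbols; infer_instance

-- ===== CLAIM =====
def Claim_equal_match_symbols : Prop := ∀ (symbols : List String) (symbol_tags : List (String × List String)) (keywords : List String) (blacklist : List String), Dom_match_symbols symbols symbol_tags keywords blacklist → Spec_match_symbols symbols symbol_tags keywords blacklist (match_symbols symbols symbol_tags keywords blacklist)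

-- ===== LEMMAS AND PROOFS =====
-- get? of a "filtered re-insertion" fold over an association list with distinct keys
theorem pv_get?_filter_fold (pred : String × List String → Bool)
    (l : List (String × List String)) (d : PySem.Dict String (List String)) (sym : String)
    (hnd : (l.map Prod.fst).Nodup) :
    (l.foldl (fun d p => if pred p then d.insert p.1 p.2 else d) d).get? sym
      = match l.find? (fun p => p.1 == sym) with
        | some p => if pred p then some p.2 else d.get? sym
        | none => d.get? sym := by
  induction l generalizing d with
  | nil => simp
  | cons q rest ih =>
      simp only [List.map_cons, List.nodup_cons] at hnd
      simp only [List.foldl_cons, List.find?_cons]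
      have hbase : ∀ s, s ≠ q.1 →
          (if pred q then d.insert q.1 q.2 else d).get? s = d.get? s := by
        intro s hs
        cases hp : pred q with
        | true => simp [PySem.Dict.get?_insert_of_ne d q.2 hs]
        | false => simp
      by_cases hq : q.1 = sym
      · have hfind : rest.find? (fun p => p.1 == sym) = none := by
          apply List.find?_eq_none.mpr
          intro p hp h
          exact hnd.1 (hq ▸ (beq_iff_eq.mp h) ▸ (List.mem_map_of_mem hp : p.1 ∈ rest.map Prod.fst))
        rw [ih _ hnd.2, hfind]
        simp only [hq, beq_self_eq_true]
        cases hp : pred q with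
        | true =>
            have := PySem.Dict.get?_insert_self d q.1 q.2
            subst hq
            simp [this]
        | false => simp
      · rw [ih _ hnd.2]
        have hbe : (q.1 == sym) = false := by simpa using hq
        rw [hbase sym (fun h => hq h.symm)]
        simp only [hbe]

-- find? over a key-tagged map picks the key itself
theorem pv_find?_key_map (g : String → List String) (ks : List String) (sym : String) :
    ((ks.map (fun k => (k, g k))).find? (fun p => p.1 == sym))
      = if sym ∈ ks then some (sym, g sym) else none := by
  induction ks with
  | nil => simp
  | cons q rest ih =>
      cases hq : (q == sym) with
      | true =>
          have h := beq_iff_eq.mp hq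
          subst h
          simp
      | false =>
          have h : q ≠ sym := by simpa using hq
          simp [List.find?_cons, hq, ih, Ne.symm h]

-- find? over the dict items view picks exactly the dict's binding
theorem pv_find?_items (l : List (String × List String)) (sym : String) :
    (pvDictItems l).find? (fun p => p.1 == sym)
      = ((PySem.Dict.mk l).get? sym).map (fun v => (sym, v)) := by
  unfold pvDictItems
  rw [pv_find?_key_map]
  cases hg : (PySem.Dict.mk l).get? sym with
  | none =>
      have hnk := (PySem.Dict.get?_eq_none_iff_not_mem_keys (PySem.Dict.mk l) sym).mp hg
      have hnd : sym ∉ PySem.List.dedup (l.map Prod.fst) := by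
        intro hm
        exact hnk (by simpa [PySem.Dict.keys] using (PySem.List.mem_dedup (l.map Prod.fst) sym).mp hm)
      rw [if_neg hnd]
      simp
  | some v =>
      have hmemk : sym ∈ l.map Prod.fst := by
        simpa [PySem.Dict.keys] using
          PySem.Dict.mem_keys_of_mem_items (PySem.Dict.mk l)
            (PySem.Dict.mem_items_of_get?_eq_some (PySem.Dict.mk l) hg)
      have hm : sym ∈ PySem.List.dedup (l.map Prod.fst) :=
        (PySem.List.mem_dedup (l.map Prod.fst) sym).mpr hmemk
      rw [if_pos hm, PySem.Dict.getD_of_get?_eq_some (PySem.Dict.mk l) [] hg]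
      simp

-- A's two-branch skip/keep step equals B's lookup of a conditionally inserted binding
theorem pv_branch (m : PySem.Dict String (List String)) (sym : String) (v : List String)
    (bB bW : Bool) :
    (if bB then m else if bW then m.insert sym v else m)
      = match (if !bB && bW then some v else none) with
        | some tags => m.insert sym tags
        | none => m := by
  cases bB <;> cases bW <;> simp

-- ===== VERDICT =====
theorem match_symbols_spec : Claim_equal_match_symbols := by
  intro symbols symbol_tags keywords blacklist _
  simp only [Spec_match_symbols, match_symbols, match_symbols_alt]
  refine congrArg PySem.Dict.items ?_
  apply PySem.List.foldl_congr_mem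
  intro matched sym _
  rw [pv_get?_filter_fold
        (fun p => !((p.2.map PySem.Str.lower).any (fun t => (blacklist.map PySem.Str.lower).any (fun b => PySem.Str.isIn b t)))
          && (p.2.map PySem.Str.lower).any (fun t => (keywords.map PySem.Str.lower).any (fun k => PySem.Str.isIn k t)))
        (pvDictItems symbol_tags) PySem.Dict.empty sym
        (by
          unfold pvDictItems
          simpa [List.map_map, Function.comp_def] using PySem.List.nodup_dedup (symbol_tags.map Prod.fst)),
      pv_find?_items]
  cases hg : (PySem.Dict.mk symbol_tags).get? sym with
  | none =>
      rw [PySem.Dict.getD_of_get?_eq_none (PySem.Dict.mk symbol_tags) [] hg]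
      simp [PySem.Dict.get?_empty]
  | some v =>
      rw [PySem.Dict.getD_of_get?_eq_some (PySem.Dict.mk symbol_tags) [] hg]
      simp only [Option.map_some, PySem.Dict.get?_empty]
      rw [pv_branch]
      simp [List.any_map, Function.comp_def]
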